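-- pv_equiv track=rewrite | github.com/liamstewartboyle/expred_web_app | app/expred_webapp.py | highlight_exp_pred
-- ===== SOURCE A (Python) =====
-- def highlight_exp_pred(exp, doc):
--     ret = ''
--     abrcount = 0
--     abrflag = False  # for abbreviation
--     for e, w in zip(exp, doc[0]):
--         if e == 1:
--             ret += f'<span style="background-color:tomato; float: left">{w}&nbsp;</span>'
--             abrcount = 0
--             abrflag = False
--         else:
--             if abrflag:
--                 continue
--             abrcount += 1
--             if abrcount > 4:
--                 abrflag = True
--                 ret += f'<span style="float:left">...&nbsp;</span>'
--             else:
--                 ret += f'<span style="float:left">{w}&nbsp;</span>'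
--     return ret
-- ===== SOURCE B (Python) =====
-- def highlight_exp_pred(exp, doc):
--     # group the zipped stream into maximal runs keyed on (e == 1), then render each run
--     runs = []
--     for e, w in zip(exp, doc[0]):
--         k = (e == 1)
--         if runs and runs[-1][0] == k:
--             runs[-1][1].append(w)
--         else:
--             runs.append((k, [w]))
--     out = []
--     for k, ws in runs:
--         if k:
--             for w in ws:
--                 out.append(f'<span style="background-color:tomato; float: left">{w}&nbsp;</span>')
--         else:
--             for w in ws[:4]:
--                 out.append(f'<span style="float:left">{w}&nbsp;</span>')
--             if len(ws) > 4:
--                 out.append(f'<span style="float:left">...&nbsp;</span>')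
--     return ''.join(out)
-- ===== Notes on version B (the rewrite author's own statement) =====
-- stated objective: alternative
-- what changed: Replaces A's single stateful scan with a counter/flag by grouping the zipped (exp, word) stream into maximal runs keyed on e == 1 and rendering each run independently (tomato spans for true runs; first 4 words plus one '...' span for long false runs).
import Mathlib
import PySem

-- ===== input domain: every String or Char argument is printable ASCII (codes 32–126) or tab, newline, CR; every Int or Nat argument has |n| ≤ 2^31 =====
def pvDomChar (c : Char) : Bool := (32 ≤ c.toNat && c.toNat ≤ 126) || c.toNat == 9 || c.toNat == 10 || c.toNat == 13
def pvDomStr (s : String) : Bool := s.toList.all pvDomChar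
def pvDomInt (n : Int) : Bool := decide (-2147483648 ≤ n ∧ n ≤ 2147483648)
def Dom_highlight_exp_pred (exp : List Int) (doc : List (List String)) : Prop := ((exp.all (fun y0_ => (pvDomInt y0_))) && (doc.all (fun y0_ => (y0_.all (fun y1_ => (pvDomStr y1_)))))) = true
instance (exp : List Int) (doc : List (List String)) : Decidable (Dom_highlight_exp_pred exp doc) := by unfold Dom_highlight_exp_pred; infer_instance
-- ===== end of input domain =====

-- B replaces A's stateful counter/flag scan by grouping the zipped stream into maximal
-- runs keyed on (e == 1) and rendering each run independently (alternative decomposition).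

-- shared HTML snippets (the three f-strings of the Python)
def pvTom (w : String) : String := "<span style=\"background-color:tomato; float: left\">" ++ w ++ "&nbsp;</span>"
def pvPlain (w : String) : String := "<span style=\"float:left\">" ++ w ++ "&nbsp;</span>"
def pvDots : String := "<span style=\"float:left\">...&nbsp;</span>"

-- ===== PORT A =====
-- loop body of A: state (ret, abrcount, abrflag)
def pvStepA (st : String × Int × Bool) (p : Int × String) : String × Int × Bool :=
  let (ret, abrcount, abrflag) := st
  let (e, w) := p
  if e = 1 then (ret ++ pvTom w, 0, false)
  else if abrflag then (ret, abrcount, abrflag)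
  else
    let abrcount := abrcount + 1
    if abrcount > 4 then (ret ++ pvDots, abrcount, true)
    else (ret ++ pvPlain w, abrcount, false)

def highlight_exp_pred (exp : List Int) (doc : List (List String)) : String :=
  ((exp.zip (doc.headD [])).foldl pvStepA ("", 0, false)).1

-- ===== PORT B =====
-- Source B's run builder: append w to the last run if its key matches, else start a new run
def pvAddPair : List (Bool × List String) → Int × String → List (Bool × List String)
  | [], (e, w) => [((e == 1), [w])]
  | [(k, ws)], (e, w) =>
      if k == (e == 1) then [(k, ws ++ [w])] else [(k, ws), ((e == 1), [w])]
  | r :: r2 :: rs, p => r :: pvAddPair (r2 :: rs) p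

-- Source B's per-run rendering
def pvRenderRun : Bool × List String → String
  | (true, ws) => String.join (ws.map pvTom)
  | (false, ws) =>
      String.join ((ws.take 4).map pvPlain) ++ (if ws.length > 4 then pvDots else "")

def pvRenderRuns : List (Bool × List String) → String
  | [] => ""
  | r :: rs => pvRenderRun r ++ pvRenderRuns rs

def highlight_exp_pred_alt (exp : List Int) (doc : List (List String)) : String :=
  pvRenderRuns ((exp.zip (doc.headD [])).foldl pvAddPair [])

-- ===== PRECONDITION & SPEC =====
-- Pre_ excludes doc = [], on which the Python A raises IndexError at doc[0] (B raises too).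
def Pre_highlight_exp_pred (exp : List Int) (doc : List (List String)) : Prop := doc ≠ []
instance (exp : List Int) (doc : List (List String)) : Decidable (Pre_highlight_exp_pred exp doc) := by unfold Pre_highlight_exp_pred; infer_instance
def pvWitness_highlight_exp_pred : List Int × List (List String) := ([1, 0, 0], [["a", "b", "c"]])

def Spec_highlight_exp_pred (exp : List Int) (doc : List (List String)) (out : String) : Prop := out = highlight_exp_pred_alt exp doc
instance (exp : List Int) (doc : List (List String)) (out : String) : Decidable (Spec_highlight_exp_pred exp doc out) := by unfold Spec_highlight_exp_pred; infer_instance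

-- ===== CLAIM (what is proved, stated in full; the proofs are below) =====
def Claim_equal_highlight_exp_pred : Prop := ∀ (exp : List Int) (doc : List (List String)), Dom_highlight_exp_pred exp doc → Pre_highlight_exp_pred exp doc → Spec_highlight_exp_pred exp doc (highlight_exp_pred exp doc)

-- ===== LEMMAS AND PROOFS =====

theorem pvJoin_cons (a : String) (l : List String) :
    String.join (a :: l) = a ++ String.join l := by
  have h : ∀ (l : List String) (x : String),
      List.foldl (· ++ ·) x l = x ++ List.foldl (· ++ ·) "" l := by
    intro l
    induction l with
    | nil => intro x; simp [List.foldl]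
    | cons b t ih =>
        intro x
        simp only [List.foldl]
        rw [ih (x ++ b), ih ("" ++ b), String.empty_append, String.append_assoc]
  simp only [String.join, List.foldl]
  rw [h l ("" ++ a), String.empty_append]

-- A's loop as a plain recursion on the pair list (c = abrcount, f = abrflag)
def pvGoF : List (Int × String) → Int → Bool → String
  | [], _, _ => ""
  | (e, w) :: t, c, f =>
    if e = 1 then pvTom w ++ pvGoF t 0 false
    else if f then pvGoF t c f
    else if c + 1 > 4 then pvDots ++ pvGoF t (c + 1) true
    else pvPlain w ++ pvGoF t (c + 1) false

theorem pvFoldlA (pairs : List (Int × String)) :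
    ∀ (r : String) (c : Int) (f : Bool),
      (pairs.foldl pvStepA (r, c, f)).1 = r ++ pvGoF pairs c f := by
  induction pairs with
  | nil => intro r c f; simp [pvGoF]
  | cons p t ih =>
      rcases p with ⟨e, w⟩
      intro r c f
      simp only [List.foldl, pvGoF, pvStepA]
      by_cases he : e = 1
      · simp [he, ih, String.append_assoc]
      · by_cases hf : f
        · simp [he, hf, ih]
        · by_cases hc : c + 1 > 4
          · simp [he, hf, hc, ih, String.append_assoc]
          · simp [he, hf, hc, ih, String.append_assoc]

-- run grouping, rebuilt from the head
def pvConsRun (k : Bool) (w : String) : List (Bool × List String) → List (Bool × List String)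
  | (k', ws) :: rs => if k = k' then (k, w :: ws) :: rs else (k, [w]) :: (k', ws) :: rs
  | [] => [(k, [w])]

def pvGr : List (Int × String) → List (Bool × List String)
  | [] => []
  | (e, w) :: t => pvConsRun (e == 1) w (pvGr t)

def pvMergeFront (k : Bool) (ws : List String) : List (Bool × List String) → List (Bool × List String)
  | (k', ws') :: g => if k = k' then (k, ws ++ ws') :: g else (k, ws) :: (k', ws') :: g
  | [] => [(k, ws)]

theorem pvAddPair_append (rs : List (Bool × List String)) (k : Bool) (ws : List String)
    (p : Int × String) :
    pvAddPair (rs ++ [(k, ws)]) p = rs ++ pvAddPair [(k, ws)] p := by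
  induction rs with
  | nil => simp
  | cons r t ih =>
      cases t with
      | nil => rcases p with ⟨e, w⟩; simp [pvAddPair]
      | cons r2 t2 =>
          simp only [List.cons_append, pvAddPair]
          rw [← List.cons_append, ih]
          simp [pvAddPair]

theorem pvMerge_aux (pairs : List (Int × String)) :
    ∀ (rs : List (Bool × List String)) (k : Bool) (ws : List String),
      pairs.foldl pvAddPair (rs ++ [(k, ws)]) = rs ++ pvMergeFront k ws (pvGr pairs) := by
  induction pairs with
  | nil => intro rs k ws; simp [pvGr, pvMergeFront]
  | cons p t ih =>
      rcases p with ⟨e, w⟩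
      intro rs k ws
      simp only [List.foldl, pvGr]
      rw [pvAddPair_append]
      by_cases hk : k = (e == 1)
      · have : pvAddPair [(k, ws)] (e, w) = [(k, ws ++ [w])] := by
          simp [pvAddPair, hk]
        rw [this, ih rs k (ws ++ [w])]
        congr 1
        cases hg : pvGr t with
        | nil => simp [pvConsRun, pvMergeFront, ← hk]
        | cons r2 g =>
            rcases r2 with ⟨k2, ws2⟩
            by_cases h2 : k = k2
            · simp [pvConsRun, pvMergeFront, ← hk, ← h2]
            · have h2' : ¬ ((e == 1) = k2) := by rw [← hk]; exact h2
              simp [pvConsRun, pvMergeFront, h2, h2', ← hk]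
      · have : pvAddPair [(k, ws)] (e, w) = [(k, ws), ((e == 1), [w])] := by
          simp [pvAddPair]
          intro h; exact absurd h hk
        rw [this]
        have : rs ++ [(k, ws), ((e == 1), [w])] = (rs ++ [(k, ws)]) ++ [((e == 1), [w])] := by simp
        rw [this, ih (rs ++ [(k, ws)]) (e == 1) [w]]
        simp only [List.append_assoc, List.singleton_append]
        congr 1
        cases hg : pvGr t with
        | nil => simp [pvConsRun, pvMergeFront, hk]
        | cons r2 g =>
            rcases r2 with ⟨k2, ws2⟩
            by_cases h2 : (e == 1) = k2
            · have hk2 : ¬ k = k2 := h2 ▸ hk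
              simp [pvConsRun, pvMergeFront, h2, hk2]
            · simp [pvConsRun, pvMergeFront, h2, hk]

theorem pvMergeFront_singleton (k : Bool) (w : String) (rs : List (Bool × List String)) :
    pvMergeFront k [w] rs = pvConsRun k w rs := by
  cases rs with
  | nil => rfl
  | cons r g =>
      rcases r with ⟨k2, ws2⟩
      by_cases h : k = k2 <;> simp [pvMergeFront, pvConsRun, h]

theorem pvFoldl_gr (pairs : List (Int × String)) :
    pairs.foldl pvAddPair [] = pvGr pairs := by
  cases pairs with
  | nil => rfl
  | cons p t =>
      rcases p with ⟨e, w⟩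
      simp only [List.foldl, pvGr, pvAddPair]
      have := pvMerge_aux t [] (e == 1) [w]
      simp only [List.nil_append] at this
      rw [this, pvMergeFront_singleton]

-- rendering of a false run whose first c items were already consumed by A's counter
def pvFalseRun (c : Int) (ws : List String) : String :=
  String.join ((ws.take (4 - c).toNat).map pvPlain) ++ (if c + ws.length > 4 then pvDots else "")

def pvRenderOffset (c : Int) : List (Bool × List String) → String
  | (false, ws) :: g => pvFalseRun c ws ++ pvRenderRuns g
  | rs => pvRenderRuns rs

def pvDropFalseHead : List (Bool × List String) → List (Bool × List String)
  | (false, _) :: g => g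
  | rs => rs

theorem pvRenderRun_false (ws : List String) : pvRenderRun (false, ws) = pvFalseRun 0 ws := by
  have h4 : ((4 : Int) - 0).toNat = 4 := by decide
  have hiff : ((0 : Int) + ws.length > 4) ↔ (ws.length > 4) := by omega
  simp only [pvRenderRun, pvFalseRun, h4, hiff]

theorem pvRenderOffset_zero (rs : List (Bool × List String)) :
    pvRenderOffset 0 rs = pvRenderRuns rs := by
  cases rs with
  | nil => rfl
  | cons r g =>
      rcases r with ⟨k, ws⟩
      cases k with
      | false => simp [pvRenderOffset, pvRenderRuns, pvRenderRun_false]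
      | true => rfl

theorem pvRenderRuns_consRun_true (w : String) (rs : List (Bool × List String)) :
    pvRenderRuns (pvConsRun true w rs) = pvTom w ++ pvRenderRuns rs := by
  cases rs with
  | nil =>
      simp [pvConsRun, pvRenderRuns, pvRenderRun, pvJoin_cons, String.join, String.append_empty]
  | cons r g =>
      rcases r with ⟨k2, ws2⟩
      cases k2 with
      | true =>
          simp [pvConsRun, pvRenderRuns, pvRenderRun, pvJoin_cons, String.append_assoc]
      | false =>
          simp [pvConsRun, pvRenderRuns, pvRenderRun, pvJoin_cons, String.join,
            String.append_empty, String.append_assoc]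

theorem pvFalseRun_cons (c : Int) (w : String) (ws : List String) (hc : ¬ c + 1 > 4) :
    pvFalseRun c (w :: ws) = pvPlain w ++ pvFalseRun (c + 1) ws := by
  have ht : (4 - c).toNat = (3 - c).toNat + 1 := by omega
  have htk : (3 - c).toNat = (4 - (c + 1)).toNat := by omega
  have hlen : (c + ((w :: ws).length : Int) > 4) ↔ ((c + 1) + (ws.length : Int) > 4) := by
    simp only [List.length_cons]; push_cast; omega
  simp only [pvFalseRun, ht, htk, List.take_succ_cons, List.map_cons, pvJoin_cons,
    String.append_assoc, hlen]

theorem pvFalseRun_dots (c : Int) (w : String) (ws : List String) (hc : c + 1 > 4) :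
    pvFalseRun c (w :: ws) = pvDots := by
  have h0 : (4 - c).toNat = 0 := by omega
  have h1 : (4 : Int) < c + ((ws.length : Int) + 1) := by omega
  simp [pvFalseRun, h0, h1, String.join]

-- the main invariant: A's recursion against B's run decomposition
theorem pvMain (t : List (Int × String)) :
    (∀ c : Int, pvGoF t c false = pvRenderOffset c (pvGr t)) ∧
    (∀ c : Int, pvGoF t c true = pvRenderRuns (pvDropFalseHead (pvGr t))) := by
  induction t with
  | nil => constructor <;> intro c <;> rfl
  | cons p t ih =>
      rcases p with ⟨e, w⟩
      rcases ih with ⟨ihF, ihT⟩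
      by_cases he : e = 1
      · have hb : (e == 1) = true := by simp [he]
        have hgr : pvGr ((e, w) :: t) = pvConsRun true w (pvGr t) := by
          simp [pvGr, hb]
        have hgo : ∀ (c : Int) (f : Bool),
            pvGoF ((e, w) :: t) c f = pvTom w ++ pvGoF t 0 false := by
          intro c f; simp [pvGoF, he]
        have hval : ∀ c : Int, pvTom w ++ pvGoF t 0 false
            = pvTom w ++ pvRenderRuns (pvGr t) := by
          intro c; rw [ihF 0, pvRenderOffset_zero]
        constructor
        · intro c
          rw [hgo, hval c, hgr, ← pvRenderRuns_consRun_true]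
          cases hg : pvConsRun true w (pvGr t) with
          | nil => rfl
          | cons r g =>
              rcases r with ⟨k2, ws2⟩
              cases k2 with
              | true => rfl
              | false =>
                  exfalso
                  cases hgt : pvGr t with
                  | nil => rw [hgt] at hg; simp [pvConsRun] at hg
                  | cons r2 g2 =>
                      rcases r2 with ⟨k3, ws3⟩
                      rw [hgt] at hg
                      by_cases h3 : true = k3 <;> simp [pvConsRun, h3] at hg
                      · exact absurd (hg.1.1.symm.trans h3.symm) (by simp [hg])
        · intro c
          rw [hgo, hval c, hgr, ← pvRenderRuns_consRun_true]
          congr 1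
          cases hgt : pvGr t with
          | nil => rfl
          | cons r2 g2 =>
              rcases r2 with ⟨k3, ws3⟩
              cases k3 with
              | true => simp [pvConsRun]; rfl
              | false => simp [pvConsRun]; rfl
      · have hb : (e == 1) = false := by simp [he]
        have hgr : pvGr ((e, w) :: t) = pvConsRun false w (pvGr t) := by
          simp [pvGr, hb]
        constructor
        · intro c
          by_cases hc : c + 1 > 4
          · have hgo : pvGoF ((e, w) :: t) c false = pvDots ++ pvGoF t (c + 1) true := by
              simp [pvGoF, he, hc]
            rw [hgo, ihT (c + 1), hgr]
            cases hgt : pvGr t with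
            | nil =>
                simp [pvConsRun, pvRenderOffset, pvDropFalseHead, pvRenderRuns,
                  pvFalseRun_dots c w [] hc, String.append_empty]
            | cons r2 g2 =>
                rcases r2 with ⟨k3, ws3⟩
                cases k3 with
                | false =>
                    simp [pvConsRun, pvRenderOffset, pvDropFalseHead,
                      pvFalseRun_dots c w ws3 hc]
                | true =>
                    simp [pvConsRun, pvRenderOffset, pvDropFalseHead, pvRenderRuns,
                      pvFalseRun_dots c w [] hc, String.append_assoc]
          · have hgo : pvGoF ((e, w) :: t) c false = pvPlain w ++ pvGoF t (c + 1) false := by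
              simp [pvGoF, he, hc]
            rw [hgo, ihF (c + 1), hgr]
            have hz : pvFalseRun (c + 1) [] = "" := by
              simp only [pvFalseRun, List.take_nil, List.map_nil, String.join, List.foldl,
                List.length_nil, Nat.cast_zero, add_zero]
              rw [if_neg (by omega), String.append_empty]
            cases hgt : pvGr t with
            | nil =>
                simp [pvConsRun, pvRenderOffset, pvRenderRuns, hz,
                  pvFalseRun_cons c w [] hc, String.append_empty]
            | cons r2 g2 =>
                rcases r2 with ⟨k3, ws3⟩
                cases k3 with
                | false =>
                    simp [pvConsRun, pvRenderOffset, pvFalseRun_cons c w ws3 hc,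
                      String.append_assoc]
                | true =>
                    simp [pvConsRun, pvRenderOffset, pvRenderRuns, hz,
                      pvFalseRun_cons c w [] hc, String.append_assoc]
        · intro c
          have hgo : pvGoF ((e, w) :: t) c true = pvGoF t c true := by
            simp [pvGoF, he]
          rw [hgo, ihT c, hgr]
          congr 1
          cases hgt : pvGr t with
          | nil => rfl
          | cons r2 g2 =>
              rcases r2 with ⟨k3, ws3⟩
              cases k3 with
              | false => rfl
              | true => rfl

-- ===== VERDICT (by name: the statement is the Claim_ definition above) =====
theorem highlight_exp_pred_spec : Claim_equal_highlight_exp_pred := by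
  intro exp doc _ _
  unfold Spec_highlight_exp_pred highlight_exp_pred highlight_exp_pred_alt
  rw [pvFoldlA, String.empty_append, (pvMain _).1 0, pvRenderOffset_zero, pvFoldl_gr]
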